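-- pv_equiv track=rewrite | github.com/BioDynaMo/biodynamo | util/demo_to_notebook.py | Indent
-- ===== SOURCE A (Python) =====
-- def Indent(string, spaces=2):
-- 	new_string = ''
-- 	lines = string.splitlines()
-- 	skip = True
-- 	for line in lines:
-- 		if line == "" and skip:
-- 			continue
-- 		new_string += line + "\n"
-- 		skip = False
-- 	return new_string
-- ===== SOURCE B (Python) =====
-- def Indent(string, spaces=2):
--     # Single char-level pass: strip the leading run of line terminators, then
--     # copy characters while normalizing every terminator (\r\n, \r, \n) to \n,
--     # finally add a trailing \n if the text does not end in a terminator.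
--     rest = string.lstrip('\r\n')
--     out = []
--     i, n = 0, len(rest)
--     while i < n:
--         if rest[i] == '\r':
--             out.append('\n')
--             if i + 1 < n and rest[i + 1] == '\n':
--                 i += 1
--         else:
--             out.append(rest[i])
--         i += 1
--     if rest and rest[-1] not in '\r\n':
--         out.append('\n')
--     return ''.join(out)
-- ===== Notes on version B (the rewrite author's own statement) =====
-- stated objective: alternative
-- what changed: Instead of splitting into a list of lines and re-joining them under a skip flag, B never builds lines at all: one character-level scan that strips the leading run of line terminators, normalizes every terminator (\r\n, \r, \n) to \n in place, and appends a final \n when the text does not end in a terminator.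
import Mathlib
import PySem

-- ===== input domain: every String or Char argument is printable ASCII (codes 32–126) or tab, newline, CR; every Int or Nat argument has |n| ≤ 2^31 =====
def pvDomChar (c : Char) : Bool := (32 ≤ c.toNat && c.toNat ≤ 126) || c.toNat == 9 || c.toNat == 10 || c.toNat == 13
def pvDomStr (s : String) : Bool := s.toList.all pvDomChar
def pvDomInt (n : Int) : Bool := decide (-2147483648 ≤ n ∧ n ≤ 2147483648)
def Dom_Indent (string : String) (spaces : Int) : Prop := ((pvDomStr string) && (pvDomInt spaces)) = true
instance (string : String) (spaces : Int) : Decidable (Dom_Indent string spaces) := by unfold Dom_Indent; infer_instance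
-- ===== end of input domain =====

-- B replaces A's split-into-lines-and-rejoin under a skip flag by a single character-level
-- scan: strip the leading run of line terminators, normalize each terminator to '\n',
-- append a final '\n' when the text does not end in one (objective: alternative).

-- ===== PORT A =====
-- the for-loop over lines, state = (new_string accumulator, skip flag)
def indentLoopA : List String → String → Bool → String
  | [], acc, _ => acc
  | l :: ls, acc, skip =>
    if l == "" && skip then indentLoopA ls acc skip
    else indentLoopA ls (acc ++ l ++ "\n") false

def Indent (string : String) (spaces : Int) : String :=
  indentLoopA (PySem.Str.splitlines string) "" true

-- ===== PORT B =====
-- Source B: rest[i] == '\r' / lookahead rest[i+1] == '\n' / other char — the while loop over i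
def isNLB (c : Char) : Bool := c == '\r' || c == '\n'

def normScanB : List Char → List Char
  | [] => []
  | '\r' :: '\n' :: rest => '\n' :: normScanB rest
  | '\r' :: rest => '\n' :: normScanB rest
  | c :: rest => c :: normScanB rest

def Indent_alt (string : String) (spaces : Int) : String :=
  let rest := string.toList.dropWhile isNLB   -- string.lstrip('\r\n'): drop the leading run of '\r'/'\n'
  let out := normScanB rest
  -- if rest and rest[-1] not in '\r\n': out.append('\n')
  let out2 := if rest.getLast?.any (fun c => !isNLB c) then out ++ ['\n'] else out
  String.ofList out2   -- ''.join(out)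

-- ===== PRECONDITION & SPEC =====
def Spec_Indent (string : String) (spaces : Int) (out : String) : Prop := out = Indent_alt string spaces
instance (string : String) (spaces : Int) (out : String) : Decidable (Spec_Indent string spaces out) := by unfold Spec_Indent; infer_instance

-- ===== CLAIM (what is proved, stated in full; the proofs are below) =====
def Claim_equal_Indent : Prop := ∀ (string : String) (spaces : Int), Dom_Indent string spaces → Spec_Indent string spaces (Indent string spaces)

-- ===== LEMMAS AND PROOFS =====

-- ---- A-side: the flag loop is join ∘ map (·++"\n") ∘ dropWhile (·=="") ∘ splitlines ----

theorem foldl_strAppend (l : List String) : ∀ a : String,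
    List.foldl (fun r s => r ++ s) a l = a ++ List.foldl (fun r s => r ++ s) "" l := by
  induction l with
  | nil => intro a; simp
  | cons b l ih =>
    intro a
    simp only [List.foldl]
    rw [ih (a ++ b), ih ("" ++ b)]
    simp [String.append_assoc]

theorem join_cons (a : String) (l : List String) : String.join (a :: l) = a ++ String.join l := by
  simp only [String.join, List.foldl]
  rw [foldl_strAppend l ("" ++ a)]
  simp

theorem indentLoopA_false (ls : List String) : ∀ acc : String,
    indentLoopA ls acc false = acc ++ String.join (ls.map (fun l => l ++ "\n")) := by
  induction ls with
  | nil => intro acc; simp [indentLoopA, String.join]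
  | cons l ls ih =>
    intro acc
    simp only [indentLoopA, Bool.and_false, Bool.false_eq_true, if_false]
    rw [ih, List.map_cons, join_cons]
    simp [String.append_assoc]

theorem indentLoopA_true (ls : List String) :
    indentLoopA ls "" true
      = String.join ((ls.dropWhile (· == "")).map (fun l => l ++ "\n")) := by
  induction ls with
  | nil => simp [indentLoopA, String.join]
  | cons l ls ih =>
    by_cases h : l = ""
    · subst h
      simp only [indentLoopA, List.dropWhile]
      simp [ih]
    · have hb : (l == "") = false := by simp [h]
      simp only [indentLoopA, List.dropWhile, hb, Bool.false_and, Bool.false_eq_true, if_false]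
      rw [indentLoopA_false, List.map_cons, join_cons]
      simp

-- ---- splitlines internals: the break predicate and step equations of splitlines.go ----

def pyIsB (c : Char) : Bool :=
  decide (c.toNat = 10) || decide (c.toNat = 13) || decide (c.toNat = 11) || decide (c.toNat = 12) ||
  decide (c.toNat = 28) || decide (c.toNat = 29) || decide (c.toNat = 30) || decide (c.toNat = 133) ||
  decide (c.toNat = 8232) || decide (c.toNat = 8233)

theorem splitlines_eq_go (cs : List Char) :
    PySem.Chars.splitlines cs = PySem.Chars.splitlines.go pyIsB cs [] [] := rfl

theorem go_nil (cur : List Char) (acc : List (List Char)) :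
    PySem.Chars.splitlines.go pyIsB [] cur acc
      = if cur.isEmpty then acc.reverse else (cur.reverse :: acc).reverse := rfl

theorem go_rn (rest cur : List Char) (acc : List (List Char)) :
    PySem.Chars.splitlines.go pyIsB ('\r' :: '\n' :: rest) cur acc
      = PySem.Chars.splitlines.go pyIsB rest [] (cur.reverse :: acc) := rfl

theorem go_cons (c : Char) (rest cur : List Char) (acc : List (List Char))
    (h : ∀ r, c = '\r' → rest = '\n' :: r → False) :
    PySem.Chars.splitlines.go pyIsB (c :: rest) cur acc
      = if pyIsB c then PySem.Chars.splitlines.go pyIsB rest [] (cur.reverse :: acc)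
        else PySem.Chars.splitlines.go pyIsB rest (c :: cur) acc := by
  rw [PySem.Chars.splitlines.go.eq_def]
  split
  · simp_all
  · rename_i r heq
    injection heq with h1 h2
    exact (h _ h1 h2).elim
  · rename_i c' rest' hne hh
    injection hh with h1 h2
    subst h1; subst h2; rfl

theorem char_toNat_eq (c d : Char) (h : c.toNat = d.toNat) : c = d := by
  apply Char.ext
  exact UInt32.toNat_inj.mp h

theorem beq_char_lit (c d : Char) : (c == d) = decide (c.toNat = d.toNat) := by
  by_cases h : c = d
  · subst h; simp
  · have h2 : c.toNat ≠ d.toNat := fun hn => h (char_toNat_eq c d hn)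
    simp [h, h2]

theorem dom_isB (c : Char) (h : pvDomChar c = true) : pyIsB c = isNLB c := by
  have h' : (32 ≤ c.toNat ∧ c.toNat ≤ 126) ∨ c.toNat = 9 ∨ c.toNat = 10 ∨ c.toNat = 13 := by
    simpa [pvDomChar, or_assoc] using h
  simp only [pyIsB, isNLB, beq_char_lit c '\r', beq_char_lit c '\n',
    show ('\r').toNat = 13 from rfl, show ('\n').toNat = 10 from rfl]
  apply Bool.eq_iff_iff.mpr
  simp only [Bool.or_eq_true, decide_eq_true_eq]
  rcases h' with ⟨h1, h2⟩ | h1 | h1 | h1 <;> omega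

theorem normScanB_cons_r (rest : List Char) (hne : ∀ r, rest = '\n' :: r → False) :
    normScanB ('\r' :: rest) = '\n' :: normScanB rest := by
  rw [normScanB.eq_def]
  split
  · rename_i heq; injection heq
  · rename_i heq
    injection heq with _ h2
    exact (hne _ h2).elim
  · rename_i heq
    injection heq with _ h2
    rw [h2]
  · rename_i hh hcc heq
    injection heq with h1 _
    exact (hcc h1.symm).elim

theorem normScanB_cons (c : Char) (rest : List Char) (hcr : c = '\r' → False) :
    normScanB (c :: rest) = c :: normScanB rest := by
  rw [normScanB.eq_def]
  split
  · rename_i heq; injection heq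
  · rename_i heq; injection heq with h1 _; exact (hcr h1).elim
  · rename_i heq; injection heq with h1 _; exact (hcr h1).elim
  · rename_i heq; injection heq with h1 h2; rw [h1, h2]

-- ---- accumulator extraction for go ----

theorem go_acc : ∀ cs : List Char, ∀ cur : List Char, ∀ acc : List (List Char),
    PySem.Chars.splitlines.go pyIsB cs cur acc
      = acc.reverse ++ PySem.Chars.splitlines.go pyIsB cs cur [] := by
  intro cs
  induction cs using normScanB.induct with
  | case1 => intro cur acc; rw [go_nil, go_nil]; split <;> simp
  | case2 rest ih =>
    intro cur acc
    rw [go_rn, go_rn, ih, ih [] [cur.reverse]]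
    simp
  | case3 rest hne ih =>
    intro cur acc
    have h : ∀ r : List Char, '\r' = '\r' → rest = '\n' :: r → False := by
      intro r _ hr; exact hne r hr
    rw [go_cons _ _ _ _ h, go_cons _ _ _ _ h]
    have hb : pyIsB '\r' = true := by decide
    rw [hb]
    simp only [if_true]
    rw [ih, ih [] [cur.reverse]]
    simp
  | case4 c rest h4 hcr ih =>
    intro cur acc
    rw [go_cons _ _ _ _ h4, go_cons _ _ _ _ h4]
    by_cases hb : pyIsB c = true
    · rw [hb]; simp only [if_true]
      rw [ih, ih [] [cur.reverse]]; simp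
    · rw [Bool.eq_false_iff.mpr hb]; simp only [Bool.false_eq_true, if_false]
      rw [ih, ih (c :: cur) []]

-- prepend a pending (reversed) current line onto the first produced line
def pf (a : List Char) : List (List Char) → List (List Char)
  | [] => if a.isEmpty then [] else [a]
  | l :: ls => (a ++ l) :: ls

theorem go_cur : ∀ cs : List Char, ∀ cur : List Char,
    PySem.Chars.splitlines.go pyIsB cs cur []
      = pf cur.reverse (PySem.Chars.splitlines.go pyIsB cs [] []) := by
  intro cs
  induction cs using normScanB.induct with
  | case1 =>
    intro cur
    rw [go_nil, go_nil]
    simp only [List.isEmpty_nil, if_true, List.reverse_nil]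
    by_cases h : cur = []
    · subst h; simp [pf]
    · have h1 : cur.isEmpty = false := by simp [h]
      simp [h1, pf, List.isEmpty_reverse, h]
  | case2 rest ih =>
    intro cur
    rw [go_rn, go_rn]
    simp only [List.reverse_nil]
    rw [go_acc rest [] [cur.reverse], go_acc rest [] [[]]]
    simp [pf]
  | case3 rest hne ih =>
    intro cur
    have h : ∀ r : List Char, '\r' = '\r' → rest = '\n' :: r → False := by
      intro r _ hr; exact hne r hr
    rw [go_cons _ _ _ _ h, go_cons _ _ _ _ h]
    have hb : pyIsB '\r' = true := by decide
    rw [hb]; simp only [if_true, List.reverse_nil]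
    rw [go_acc rest [] [cur.reverse], go_acc rest [] [[]]]
    simp [pf]
  | case4 c rest h4 hcr ih =>
    intro cur
    rw [go_cons _ _ _ _ h4, go_cons _ _ _ _ h4]
    by_cases hb : pyIsB c = true
    · rw [hb]; simp only [if_true, List.reverse_nil]
      rw [go_acc rest [] [cur.reverse], go_acc rest [] [[]]]
      simp [pf]
    · rw [Bool.eq_false_iff.mpr hb]; simp only [Bool.false_eq_true, if_false]
      rw [ih (c :: cur), ih [c]]
      cases PySem.Chars.splitlines.go pyIsB rest [] [] with
      | nil =>
        simp only [pf, List.reverse_cons, List.isEmpty_nil]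
        split <;> rename_i hx
        · simp at hx
        · simp [pf]
      | cons l ls => simp [pf]

-- ---- the char-level value of A's pipeline ----

def tailFix (cs : List Char) : List Char :=
  if cs.getLast?.any (fun c => !isNLB c) then ['\n'] else []

def tailB (cs cur : List Char) : List Char :=
  if cs.isEmpty then (if cur.isEmpty then [] else cur.reverse ++ ['\n'])
  else cur.reverse ++ normScanB cs ++ tailFix cs

theorem go_flatMap : ∀ cs : List Char, (∀ c ∈ cs, pvDomChar c = true) →
    ∀ cur : List Char, ∀ acc : List (List Char),
    (PySem.Chars.splitlines.go pyIsB cs cur acc).flatMap (· ++ ['\n'])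
      = acc.reverse.flatMap (· ++ ['\n']) ++ tailB cs cur := by
  intro cs
  induction cs using normScanB.induct with
  | case1 =>
    intro _ cur acc
    rw [go_nil]
    split <;> rename_i h <;> simp_all [tailB]
  | case2 rest ih =>
    intro hdom cur acc
    have hdr : ∀ c ∈ rest, pvDomChar c = true := fun c hcm => hdom c (by simp [hcm])
    rw [go_rn, ih hdr]
    cases rest with
    | nil => simp [tailB, tailFix, normScanB, isNLB]
    | cons r rs =>
      simp only [tailB, tailFix, normScanB, List.isEmpty_cons, List.reverse_cons,
        List.flatMap_append, List.getLast?_cons_cons]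
      simp [List.append_assoc]
  | case3 rest hne ih =>
    intro hdom cur acc
    have hdr : ∀ c ∈ rest, pvDomChar c = true := fun c hcm => hdom c (by simp [hcm])
    have h : ∀ r : List Char, '\r' = '\r' → rest = '\n' :: r → False := by
      intro r _ hr; exact hne r hr
    rw [go_cons _ _ _ _ h]
    have hb : pyIsB '\r' = true := by decide
    rw [hb]; simp only [if_true]
    rw [ih hdr]
    have hnorm := normScanB_cons_r rest hne
    cases rest with
    | nil => simp [tailB, tailFix, normScanB, isNLB]
    | cons r rs =>
      simp only [tailB, tailFix, hnorm, List.isEmpty_cons, List.reverse_cons,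
        List.flatMap_append, List.getLast?_cons_cons]
      simp [List.append_assoc]
  | case4 c rest h4 hcr ih =>
    intro hdom cur acc
    have hdr : ∀ x ∈ rest, pvDomChar x = true := fun x hcm => hdom x (by simp [hcm])
    have hdc : pvDomChar c = true := hdom c (by simp)
    rw [go_cons _ _ _ _ h4]
    have hnorm := normScanB_cons c rest hcr
    by_cases hb : pyIsB c = true
    · rw [hb]; simp only [if_true]
      rw [ih hdr]
      have hcn : c = '\n' := by
        have hx := (dom_isB c hdc).symm.trans hb
        simp only [isNLB, Bool.or_eq_true, beq_iff_eq] at hx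
        rcases hx with h1 | h1
        · exact (hcr h1).elim
        · exact h1
      subst hcn
      cases rest with
      | nil => simp [tailB, tailFix, normScanB, isNLB]
      | cons r rs =>
        simp only [tailB, tailFix, hnorm, List.isEmpty_cons, List.reverse_cons,
          List.flatMap_append, List.getLast?_cons_cons]
        simp [isNLB, List.append_assoc]
    · rw [Bool.eq_false_iff.mpr hb]; simp only [Bool.false_eq_true, if_false]
      rw [ih hdr]
      have hcnl : isNLB c = false := by
        rw [← dom_isB c hdc]; exact Bool.eq_false_iff.mpr hb
      cases rest with
      | nil =>
        simp [tailB, tailFix, normScanB, hcnl, List.append_assoc]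
      | cons r rs =>
        simp only [tailB, tailFix, hnorm, List.isEmpty_cons, List.reverse_cons,
          List.getLast?_cons_cons]
        simp [List.append_assoc]

-- ---- dropping the leading blank lines = dropping the leading terminator run ----

theorem go_drop : ∀ cs : List Char, (∀ c ∈ cs, pvDomChar c = true) →
    PySem.Chars.splitlines.go pyIsB (cs.dropWhile isNLB) [] []
      = (PySem.Chars.splitlines.go pyIsB cs [] []).dropWhile (fun l => l.isEmpty) := by
  intro cs
  induction cs using normScanB.induct with
  | case1 => intro _; simp [go_nil]
  | case2 rest ih =>
    intro hdom
    have hdr : ∀ c ∈ rest, pvDomChar c = true := fun c hcm => hdom c (by simp [hcm])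
    have hd : ('\r' :: '\n' :: rest).dropWhile isNLB = rest.dropWhile isNLB := by
      simp [List.dropWhile_cons, isNLB]
    rw [hd, ih hdr, go_rn]
    simp only [List.reverse_nil]
    rw [go_acc rest [] [[]]]
    simp
  | case3 rest hne ih =>
    intro hdom
    have hdr : ∀ c ∈ rest, pvDomChar c = true := fun c hcm => hdom c (by simp [hcm])
    have h : ∀ r : List Char, '\r' = '\r' → rest = '\n' :: r → False := by
      intro r _ hr; exact hne r hr
    have hd : ('\r' :: rest).dropWhile isNLB = rest.dropWhile isNLB := by
      simp [List.dropWhile_cons, isNLB]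
    rw [hd, ih hdr, go_cons _ _ _ _ h]
    have hb : pyIsB '\r' = true := by decide
    rw [hb]; simp only [if_true, List.reverse_nil]
    rw [go_acc rest [] [[]]]
    simp
  | case4 c rest h4 hcr ih =>
    intro hdom
    have hdr : ∀ x ∈ rest, pvDomChar x = true := fun x hcm => hdom x (by simp [hcm])
    have hdc : pvDomChar c = true := hdom c (by simp)
    by_cases hnl : isNLB c = true
    · have hcn : c = '\n' := by
        simp only [isNLB, Bool.or_eq_true, beq_iff_eq] at hnl
        rcases hnl with h1 | h1
        · exact (hcr h1).elim
        · exact h1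
      subst hcn
      have hd : ('\n' :: rest).dropWhile isNLB = rest.dropWhile isNLB := by
        simp [List.dropWhile_cons, isNLB]
      rw [hd, ih hdr, go_cons _ _ _ _ h4]
      have hb : pyIsB '\n' = true := by decide
      rw [hb]; simp only [if_true, List.reverse_nil]
      rw [go_acc rest [] [[]]]
      simp
    · have hd : (c :: rest).dropWhile isNLB = c :: rest := by
        simp [List.dropWhile_cons, Bool.eq_false_iff.mpr hnl]
      rw [hd]
      have hb : pyIsB c = false := by rw [dom_isB c hdc]; exact Bool.eq_false_iff.mpr hnl
      have hgo : PySem.Chars.splitlines.go pyIsB (c :: rest) [] []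
          = pf [c] (PySem.Chars.splitlines.go pyIsB rest [] []) := by
        rw [go_cons _ _ _ _ h4, hb]
        simp only [Bool.false_eq_true, if_false]
        exact go_cur rest [c]
      rw [hgo]
      cases PySem.Chars.splitlines.go pyIsB rest [] [] with
      | nil => simp [pf]
      | cons l ls => simp [pf]

-- ---- string-level bridges ----

theorem splitlines_eq_map (s : String) :
    PySem.Str.splitlines s = (PySem.Chars.splitlines s.toList).map String.ofList := by
  rw [← PySem.Str.splitlines_map_toList s, List.map_map]
  simp [Function.comp_def, String.ofList_toList]

theorem beq_empty_ofList (l : List Char) : (String.ofList l == "") = l.isEmpty := by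
  cases h : l.isEmpty with
  | true =>
    have : l = [] := by simpa [List.isEmpty_iff] using h
    subst this; rfl
  | false =>
    have hne : l ≠ [] := by simpa [List.isEmpty_iff] using h
    simp only [beq_eq_false_iff_ne, ne_eq]
    intro hcon
    exact hne (by simpa using congrArg String.toList hcon)

theorem ofList_snoc_nl (l : List Char) : String.ofList (l ++ ['\n']) = String.ofList l ++ "\n" := by
  rw [String.ofList_append]

theorem join_map_ofList (L : List (List Char)) :
    String.join ((L.map String.ofList).map (fun l => l ++ "\n"))
      = String.ofList (L.flatMap (· ++ ['\n'])) := by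
  induction L with
  | nil => rfl
  | cons l ls ih =>
    simp only [List.map_cons, List.flatMap_cons, join_cons, ih, ← List.append_assoc,
      String.ofList_append, ofList_snoc_nl, String.append_assoc]

-- ===== VERDICT (by name: the statement is the Claim_ definition above) =====
theorem Indent_spec : Claim_equal_Indent := by
  intro s n hdom
  have hdomc : ∀ c ∈ s.toList, pvDomChar c = true := by
    have hs : pvDomStr s = true := by
      unfold Dom_Indent at hdom
      exact (Bool.and_eq_true _ _ |>.mp hdom).1
    simpa [pvDomStr, List.all_eq_true] using hs
  show Indent s n = Indent_alt s n
  unfold Indent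
  rw [indentLoopA_true, splitlines_eq_map, List.dropWhile_map]
  have hpred : ((fun l => l == "") ∘ String.ofList) = fun l : List Char => l.isEmpty := by
    funext l; simp [Function.comp, beq_empty_ofList]
  have hdomr : ∀ c ∈ s.toList.dropWhile isNLB, pvDomChar c = true :=
    fun c hcm => hdomc c ((List.dropWhile_sublist _).subset hcm)
  rw [hpred, join_map_ofList, splitlines_eq_go, ← go_drop s.toList hdomc,
      go_flatMap (s.toList.dropWhile isNLB) hdomr [] []]
  unfold Indent_alt tailB
  simp only [List.reverse_nil, List.flatMap_nil, List.nil_append, List.isEmpty_nil, if_true]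
  cases hrest : s.toList.dropWhile isNLB with
  | nil => simp [tailFix, normScanB]
  | cons r rs =>
    simp only [List.isEmpty_cons, Bool.false_eq_true, if_false, List.reverse_nil,
      List.nil_append, tailFix]
    split <;> simp
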